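-- pv_equiv track=rewrite | github.com/kortekoski/tira2 | fliptwo.py | solve
-- ===== SOURCE A (Python) =====
-- from collections import deque
--
-- def solve(n,k):
--     pakka = deque()
--
--     for x in range(1, n+1):
--         pakka.append(x)
--
--     while k > 0:
--         luku1 = pakka.popleft()
--         luku2 = pakka.popleft()
--         pakka.append(luku2)
--         pakka.append(luku1)
--
--         k -= 1
--
--     return pakka.popleft()
-- ===== SOURCE B (Python) =====
-- def solve(n, k):
--     # Closed form: each swap-step advances the front pointer by 2 around a
--     # circle of n cards, swapping the pair it passes.  For odd n the head
--     # sequence is 1,3,...,n with period (n+1)//2; for even n it is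
--     # 1,3,...,n-1,2,4,...,n with period n.
--     steps = k if k > 0 else 0
--     if n % 2 == 1:
--         return 2 * (steps % ((n + 1) // 2)) + 1
--     r = steps % n
--     half = n // 2
--     return 2 * r + 1 if r < half else 2 * (r - half) + 2
-- ===== Notes on version B (the rewrite author's own statement) =====
-- stated objective: faster
-- what changed: Replaced the k-iteration deque simulation by a closed-form formula for the front card (pointer advances 2 per step around a circle of n cards, pairs swapped on the wrap), so B does one modular computation instead of k deque operations.
import Mathlib
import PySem

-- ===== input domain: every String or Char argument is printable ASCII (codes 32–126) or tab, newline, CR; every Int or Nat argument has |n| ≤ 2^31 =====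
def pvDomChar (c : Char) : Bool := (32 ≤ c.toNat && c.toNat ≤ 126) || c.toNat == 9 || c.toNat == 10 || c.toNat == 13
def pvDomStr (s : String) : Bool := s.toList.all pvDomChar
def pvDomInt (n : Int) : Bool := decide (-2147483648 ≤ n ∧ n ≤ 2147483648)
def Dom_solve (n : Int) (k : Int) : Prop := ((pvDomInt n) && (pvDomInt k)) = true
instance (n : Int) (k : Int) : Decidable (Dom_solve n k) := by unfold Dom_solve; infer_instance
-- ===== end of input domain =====

-- B replaces A's k-step deque simulation by a closed-form modular formula for the front card.

-- ===== PORT A =====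
-- one iteration of A's while-loop: popleft twice, append the two cards swapped
-- (the `_ => []` arm is where Python's popleft raises IndexError; Pre_solve excludes reaching it)
def pvStep (L : List Int) : List Int :=
  match L with
  | a :: b :: rest => rest ++ [b, a]
  | _ => []

-- the while-loop runs exactly k.toNat times (k -= 1 each pass, loop while k > 0)
def pvLoop (L : List Int) : Nat → List Int
  | 0 => L
  | m + 1 => pvLoop (pvStep L) m

def solve (n : Int) (k : Int) : Int :=
  -- pakka = deque(); for x in range(1, n+1): pakka.append(x)
  let pakka := PySem.List.pyRange 1 (n + 1) 1
  -- final popleft (raises on empty deck; Pre_solve excludes that, default unreachable)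
  (pvLoop pakka k.toNat).headD 0

-- ===== PORT B =====
def solve_alt (n : Int) (k : Int) : Int :=
  let steps : Int := if k > 0 then k else 0
  if PySem.Int.mod n 2 = 1 then
    2 * PySem.Int.mod steps (PySem.Int.floordiv (n + 1) 2) + 1
  else
    let r := PySem.Int.mod steps n
    let half := PySem.Int.floordiv n 2
    if r < half then 2 * r + 1 else 2 * (r - half) + 2

-- ===== PRECONDITION & SPEC =====
-- Pre_ excludes exactly the inputs where A raises IndexError: n < 1 (empty deck), and
-- n = 1 with k > 0 (popleft of a second card from a one-card deck).
def Pre_solve (n : Int) (k : Int) : Prop := 2 ≤ n ∨ (n = 1 ∧ k ≤ 0)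
instance (n : Int) (k : Int) : Decidable (Pre_solve n k) := by unfold Pre_solve; infer_instance
def pvWitness_solve : Int × Int := (5, 3)

def Spec_solve (n : Int) (k : Int) (out : Int) : Prop := out = solve_alt n k
instance (n : Int) (k : Int) (out : Int) : Decidable (Spec_solve n k out) := by unfold Spec_solve; infer_instance

-- ===== CLAIM (what is proved, stated in full; the proofs are below) =====
def Claim_equal_solve : Prop := ∀ (n : Int) (k : Int), Dom_solve n k → Pre_solve n k → Spec_solve n k (solve n k)

-- ===== LEMMAS AND PROOFS =====

-- index map of one step: position i of the new deck holds the card from position tau i of the old one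
def pvTau (N i : Nat) : Nat := if i + 2 < N then i + 2 else if i + 2 = N then 1 else 0

-- m-fold iterate of pvTau starting at the front position 0
def pvTauIter (N : Nat) : Nat → Nat
  | 0 => 0
  | m + 1 => pvTau N (pvTauIter N m)

-- closed form of pvTauIter N m (the orbit of 0 under pvTau)
def pvOrb (N m : Nat) : Nat :=
  if N % 2 = 1 then 2 * (m % ((N + 1) / 2))
  else if m % N < N / 2 then 2 * (m % N) else 2 * (m % N - N / 2) + 1

theorem pvStep_length (L : List Int) (h : 2 ≤ L.length) : (pvStep L).length = L.length := by
  match L, h with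
  | a :: b :: rest, _ => simp [pvStep]

theorem pvStep_getD (L : List Int) (j : Nat) (h : 2 ≤ L.length) (hj : j < L.length) :
    (pvStep L).getD j 0 = L.getD (pvTau L.length j) 0 := by
  match L, h, hj with
  | a :: b :: rest, _, hj =>
    simp only [List.length_cons] at hj
    simp only [pvStep, pvTau, List.length_cons]
    rcases lt_trichotomy (j + 2) (rest.length + 2) with hlt | heq | hgt
    · rw [if_pos (by omega)]
      rw [List.getD_append _ _ _ _ (by omega)]
      simp [List.getD, List.getElem?_cons_succ]
    · rw [if_neg (by omega), if_pos (by omega)]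
      have hj' : j = rest.length := by omega
      subst hj'
      rw [List.getD_append_right _ _ _ _ (by omega)]
      simp [List.getD]
    · rw [if_neg (by omega), if_neg (by omega)]
      have hj' : j = rest.length + 1 := by omega
      subst hj'
      rw [List.getD_append_right _ _ _ _ (by omega)]
      simp [List.getD]

theorem pvTau_lt (N i : Nat) (hN : 2 ≤ N) : pvTau N i < N := by
  unfold pvTau; split_ifs <;> omega

theorem pvTauIter_lt (N m : Nat) (hN : 2 ≤ N) : pvTauIter N m < N := by
  cases m with
  | zero => simp only [pvTauIter]; omega
  | succ m => exact pvTau_lt N _ hN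

theorem headD_eq_getD_zero (L : List Int) : L.headD 0 = L.getD 0 0 := by
  cases L <;> rfl

theorem pvLoop_headD (m : Nat) : ∀ (L : List Int), 2 ≤ L.length →
    (pvLoop L m).headD 0 = L.getD (pvTauIter L.length m) 0 := by
  induction m with
  | zero => intro L _; exact headD_eq_getD_zero L
  | succ m ih =>
    intro L hL
    have hlen := pvStep_length L hL
    have h2 : 2 ≤ (pvStep L).length := by omega
    calc (pvLoop L (m + 1)).headD 0
        = (pvLoop (pvStep L) m).headD 0 := rfl
      _ = (pvStep L).getD (pvTauIter (pvStep L).length m) 0 := ih (pvStep L) h2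
      _ = (pvStep L).getD (pvTauIter L.length m) 0 := by rw [hlen]
      _ = L.getD (pvTau L.length (pvTauIter L.length m)) 0 :=
          pvStep_getD L _ hL (pvTauIter_lt _ _ (by omega))
      _ = L.getD (pvTauIter L.length (m + 1)) 0 := rfl

theorem succ_mod_eq (m P : Nat) (hP : 2 ≤ P) :
    (m + 1) % P = if m % P + 1 = P then 0 else m % P + 1 := by
  have h1 : (m + 1) % P = (m % P + 1) % P := by
    conv_lhs => rw [Nat.add_mod, Nat.mod_eq_of_lt (show 1 < P by omega)]
  have hr : m % P < P := Nat.mod_lt _ (by omega)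
  rw [h1]
  split_ifs with h
  · rw [h, Nat.mod_self]
  · exact Nat.mod_eq_of_lt (by omega)

theorem pvOrb_succ (N m : Nat) (hN : 2 ≤ N) : pvOrb N (m + 1) = pvTau N (pvOrb N m) := by
  by_cases hodd : N % 2 = 1
  · have hP : 2 ≤ (N + 1) / 2 := by omega
    have hs := succ_mod_eq m ((N + 1) / 2) hP
    have hr : m % ((N + 1) / 2) < (N + 1) / 2 := Nat.mod_lt _ (by omega)
    simp only [pvOrb, pvTau, if_pos hodd, hs]
    split_ifs <;> omega
  · have hs := succ_mod_eq m N hN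
    have hr : m % N < N := Nat.mod_lt _ (by omega)
    simp only [pvOrb, pvTau, if_neg hodd, hs]
    split_ifs <;> omega

theorem pvTauIter_eq_pvOrb (N m : Nat) (hN : 2 ≤ N) : pvTauIter N m = pvOrb N m := by
  induction m with
  | zero =>
    simp only [pvOrb, Nat.zero_mod, pvTauIter]
    split_ifs <;> omega
  | succ m ih => rw [pvTauIter, ih, ← pvOrb_succ N m hN]

theorem pvOrb_lt (N m : Nat) (hN : 2 ≤ N) : pvOrb N m < N := by
  have h1 : m % ((N + 1) / 2) < (N + 1) / 2 := Nat.mod_lt _ (by omega)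
  have h2 : m % N < N := Nat.mod_lt _ (by omega)
  unfold pvOrb; split_ifs <;> omega

theorem pyRange_one_map (N : Nat) :
    PySem.List.pyRange 1 ((N : Int) + 1) 1 = (List.range N).map (fun j : Nat => (j : Int) + 1) := by
  induction N with
  | zero => decide
  | succ N ih =>
    have h : (1 : Int) ≤ (N : Int) + 1 := by omega
    have hcast : (((N + 1 : Nat)) : Int) = ((N : Int) + 1) := by push_cast; ring
    rw [hcast, PySem.List.pyRange_one_succ_right h, ih, List.range_succ, List.map_append]
    simp

theorem solve_closed (n : Int) (k : Int) (hn : 2 ≤ n) :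
    solve n k = ((pvOrb n.toNat k.toNat : Nat) : Int) + 1 := by
  have hN : 2 ≤ n.toNat := by omega
  have hn' : ((n.toNat : Int)) = n := Int.toNat_of_nonneg (by omega)
  have hrange : PySem.List.pyRange 1 (n + 1) 1
      = (List.range n.toNat).map (fun j : Nat => (j : Int) + 1) := by
    rw [← hn']; exact pyRange_one_map n.toNat
  have hlen : (PySem.List.pyRange 1 (n + 1) 1).length = n.toNat := by
    rw [hrange]; simp
  unfold solve
  rw [pvLoop_headD k.toNat _ (by omega), hlen, pvTauIter_eq_pvOrb _ _ hN, hrange,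
    PySem.List.getD_map_range _ _ _ _ (pvOrb_lt _ _ hN)]

theorem solve_alt_closed (n : Int) (k : Int) (hn : 2 ≤ n) :
    solve_alt n k = ((pvOrb n.toNat k.toNat : Nat) : Int) + 1 := by
  have hN : 2 ≤ n.toNat := by omega
  have hn' : ((n.toNat : Int)) = n := Int.toNat_of_nonneg (by omega)
  have hk' : (if k > 0 then k else 0) = ((k.toNat : Int)) := by
    split_ifs with h
    · exact (Int.toNat_of_nonneg (le_of_lt h)).symm
    · rw [Int.toNat_of_nonpos (by omega)]; rfl
  simp only [solve_alt]
  conv_lhs => rw [hk', ← hn']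
  have hmod2 : PySem.Int.mod ((n.toNat : Int)) 2 = ((n.toNat % 2 : Nat) : Int) := by
    exact_mod_cast PySem.Int.mod_natCast n.toNat 2
  have hfd : PySem.Int.floordiv ((n.toNat : Int) + 1) 2 = (((n.toNat + 1) / 2 : Nat) : Int) := by
    have h1 : ((n.toNat : Int) + 1) = (((n.toNat + 1 : Nat)) : Int) := by push_cast; ring
    rw [h1]; exact_mod_cast PySem.Int.floordiv_natCast (n.toNat + 1) 2
  have hfd2 : PySem.Int.floordiv ((n.toNat : Int)) 2 = ((n.toNat / 2 : Nat) : Int) := by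
    exact_mod_cast PySem.Int.floordiv_natCast n.toNat 2
  have hmodP : ∀ P : Nat, PySem.Int.mod ((k.toNat : Int)) ((P : Nat) : Int)
      = ((k.toNat % P : Nat) : Int) := fun P => PySem.Int.mod_natCast k.toNat P
  by_cases hodd : n.toNat % 2 = 1
  · rw [if_pos (by rw [hmod2, hodd]; rfl), hfd, hmodP]
    simp only [pvOrb, if_pos hodd]
    push_cast; ring
  · rw [if_neg (by rw [hmod2]; intro h; exact hodd (by exact_mod_cast h))]
    rw [hmodP, hfd2]
    simp only [pvOrb, if_neg hodd]
    have hr : k.toNat % n.toNat < n.toNat := Nat.mod_lt _ (by omega)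
    by_cases hlt : k.toNat % n.toNat < n.toNat / 2
    · rw [if_pos (by exact_mod_cast hlt), if_pos hlt]
      push_cast; ring
    · rw [if_neg (by intro h; exact hlt (by exact_mod_cast h)), if_neg hlt]
      have hge : n.toNat / 2 ≤ k.toNat % n.toNat := by omega
      push_cast [hge]
      ring

theorem solve_one (k : Int) (hk : k ≤ 0) : solve 1 k = 1 := by
  unfold solve
  rw [Int.toNat_of_nonpos hk]
  decide

theorem solve_alt_one (k : Int) (hk : k ≤ 0) : solve_alt 1 k = 1 := by
  have h : (if k > 0 then k else 0) = 0 := if_neg (by omega)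
  simp only [solve_alt, h]
  decide

-- ===== VERDICT (by name: the statement is the Claim_ definition above) =====
theorem solve_spec : Claim_equal_solve := by
  intro n k _ hpre
  unfold Spec_solve
  rcases hpre with hn | ⟨hn1, hk⟩
  · rw [solve_closed n k hn, solve_alt_closed n k hn]
  · subst hn1
    rw [solve_one k hk, solve_alt_one k hk]
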